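-- pv_equiv track=rewrite | github.com/gvu0110/coding-challenges | python/keypad_string.py | keypad_string
-- ===== SOURCE A (Python) =====
-- import string
--
-- def keypad_string(keys):
--     '''
--     Given a string consisting of 0-9, find the string that is created using
--     a standard phone keypad
--     | 1        | 2 (abc) | 3 (def)  |
--     | 4 (ghi)  | 5 (jkl) | 6 (mno)  |
--     | 7 (pqrs) | 8 (tuv) | 9 (wxyz) |
--     |     *    | 0 ( )   |     #    |
--     You can ignore 1, and 0 corresponds to space
--     >>> keypad_string("12345")
--     'adgj'
--     >>> keypad_string("4433555555666")
--     'hello'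
--     >>> keypad_string("2022")
--     'a b'
--     >>> keypad_string("2212")
--     'ba'
--     >>> keypad_string("2122222")
--     'acb'
--     >>> keypad_string("")
--     ''
--     >>> keypad_string("111")
--     ''
--     '''
--     keypad = key_pad_to_letter()
--     s = ''
--     result = ''
--     for letter in keys:
--         if len(s) > 0 and (s[-1] != letter or (s + letter) not in keypad):
--             result += keypad[s]
--             s = ''
--
--         s += letter
--
--     result += keypad[s]
--     return result
--
-- def key_pad_to_letter():
--     result = {
--         '': '',
--         '0': ' ',
--         '1': '',
--     }
--     key = 2
--     repeat = 1
--     for letter in string.ascii_lowercase: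
--         if letter in {'r', 'y'}:
--             max_repeat = 4
--         else:
--             max_repeat = 3
--
--         result[str(key) * repeat] = letter
--         repeat += 1
--         if repeat > max_repeat:
--             repeat = 1
--             key += 1
--
--     return result
-- ===== SOURCE B (Python) =====
-- def keypad_string(keys):
--     mapping = {'0': ' ', '1': '', '2': 'abc', '3': 'def', '4': 'ghi',
--                '5': 'jkl', '6': 'mno', '7': 'pqrs', '8': 'tuv', '9': 'wxyz'}
--     pieces = []
--     i = 0
--     while i < len(keys):
--         j = i
--         while j < len(keys) and keys[j] == keys[i]:
--             j += 1
--         d, n = keys[i], j - i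
--         i = j
--         cyc = mapping[d]
--         if not cyc:
--             continue
--         L = len(cyc)
--         full, rem = divmod(n, L)
--         pieces.append(cyc[-1] * full)
--         if rem:
--             pieces.append(cyc[rem - 1])
--     return ''.join(pieces)
-- ===== Notes on version B (the rewrite author's own statement) =====
-- stated objective: alternative
-- what changed: Replaces A's character-by-character state machine over a generated run-string->letter dict with run-length encoding plus divmod arithmetic on each run's cycle string.
import Mathlib
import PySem

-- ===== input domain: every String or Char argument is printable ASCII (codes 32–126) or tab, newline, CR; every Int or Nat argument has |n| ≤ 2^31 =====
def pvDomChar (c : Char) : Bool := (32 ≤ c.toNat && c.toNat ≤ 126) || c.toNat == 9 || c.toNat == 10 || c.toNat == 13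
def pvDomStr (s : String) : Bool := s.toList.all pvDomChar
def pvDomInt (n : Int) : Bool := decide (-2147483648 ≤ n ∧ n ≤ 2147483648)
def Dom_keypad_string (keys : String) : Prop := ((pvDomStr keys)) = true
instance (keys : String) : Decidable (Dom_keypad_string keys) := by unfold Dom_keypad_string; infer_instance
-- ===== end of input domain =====

-- B replaces A's per-character state machine over a generated run-string→letter dict by
-- run-length encoding plus divmod arithmetic on each run's cycle string (objective: alternative).

-- ===== PORT A =====
-- key_pad_to_letter(): dict mapping run strings ('2', '22', …) to letters; keys/values as List Char.
def keyPadToLetterStep (st : PySem.Dict (List Char) (List Char) × Int × Int) (letter : Char) :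
    PySem.Dict (List Char) (List Char) × Int × Int :=
  let (result, key, rep) := st
  let maxRep : Int := if letter = 'r' ∨ letter = 'y' then 4 else 3
  -- result[str(key) * repeat] = letter  (str(key) * repeat = Python string repetition)
  let result := result.insert ((List.replicate rep.toNat (PySem.Int.toChars key)).flatten) [letter]
  let rep := rep + 1
  if rep > maxRep then (result, key + 1, 1) else (result, key, rep)

def keyPadToLetter : PySem.Dict (List Char) (List Char) :=
  ("abcdefghijklmnopqrstuvwxyz".toList.foldl keyPadToLetterStep
    (PySem.Dict.ofList [([], []), (['0'], [' ']), (['1'], [])], 2, 1)).1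

-- the for-loop over keys; state (s, result); keypad[s] lookup: KeyError (non-digit char) excluded by Pre_
def loopA : List Char → List Char → List Char → List Char
  | [], s, res => res ++ (keyPadToLetter.get? s).getD []
  | c :: rest, s, res =>
    if 0 < s.length ∧ (s.getLast? ≠ some c ∨ keyPadToLetter.contains (s ++ [c]) = false) then
      loopA rest [c] (res ++ (keyPadToLetter.get? s).getD [])
    else
      loopA rest (s ++ [c]) res

def keypad_string (keys : String) : String := String.ofList (loopA keys.toList [] [])

-- ===== PORT B =====
def mappingB : PySem.Dict Char (List Char) :=
  PySem.Dict.ofList [('0', [' ']), ('1', []), ('2', "abc".toList), ('3', "def".toList),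
    ('4', "ghi".toList), ('5', "jkl".toList), ('6', "mno".toList), ('7', "pqrs".toList),
    ('8', "tuv".toList), ('9', "wxyz".toList)]

-- the two while loops producing the run list (d, n): the inner scan is takeWhile/dropWhile
def runsB : List Char → List (Char × Nat)
  | [] => []
  | c :: cs => (c, 1 + (cs.takeWhile (· == c)).length) :: runsB (cs.dropWhile (· == c))
  termination_by l => l.length
  decreasing_by
    simpa using Nat.lt_succ_of_le (List.length_dropWhile_le (· == c) cs)

-- the piece appended for one run; mapping[d] lookup: KeyError (non-digit d) excluded by Pre_
def pieceB (d : Char) (n : Nat) : List Char :=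
  let cyc := (mappingB.get? d).getD []
  if cyc = [] then []
  else
    let L := cyc.length
    let full := n / L
    let rem := n % L
    List.replicate full (cyc.getLastD 'a') ++ (if rem ≠ 0 then [cyc.getD (rem - 1) 'a'] else [])

def keypad_string_alt (keys : String) : String :=
  String.ofList (((runsB keys.toList).map (fun p => pieceB p.1 p.2)).flatten)

-- ===== PRECONDITION & SPEC =====
-- Pre_ excludes exactly the strings containing a character outside 0-9: there A (and B) raises KeyError.
def Pre_keypad_string (keys : String) : Prop :=
  keys.toList.all (['0','1','2','3','4','5','6','7','8','9'].contains ·) = true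
instance (keys : String) : Decidable (Pre_keypad_string keys) := by
  unfold Pre_keypad_string; infer_instance
def pvWitness_keypad_string : String := "23"

def Spec_keypad_string (keys : String) (out : String) : Prop := out = keypad_string_alt keys
instance (keys : String) (out : String) : Decidable (Spec_keypad_string keys out) := by
  unfold Spec_keypad_string; infer_instance

-- ===== CLAIM (what is proved, stated in full; the proofs are below) =====
def Claim_equal_keypad_string : Prop := ∀ (keys : String), Dom_keypad_string keys →
  Pre_keypad_string keys → Spec_keypad_string keys (keypad_string keys)

-- ===== LEMMAS AND PROOFS =====

-- keyPadToLetter evaluated once to its literal value (checked by the kernel)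
set_option maxRecDepth 8000 in
lemma keypad_eval : keyPadToLetter = PySem.Dict.mk [([], []), (['0'], [' ']), (['1'], []), (['2'], ['a']), (['2', '2'], ['b']), (['2', '2', '2'], ['c']), (['3'], ['d']), (['3', '3'], ['e']), (['3', '3', '3'], ['f']), (['4'], ['g']), (['4', '4'], ['h']), (['4', '4', '4'], ['i']), (['5'], ['j']), (['5', '5'], ['k']), (['5', '5', '5'], ['l']), (['6'], ['m']), (['6', '6'], ['n']), (['6', '6', '6'], ['o']), (['7'], ['p']), (['7', '7'], ['q']), (['7', '7', '7'], ['r']), (['7', '7', '7', '7'], ['s']), (['8'], ['t']), (['8', '8'], ['u']), (['8', '8', '8'], ['v']), (['9'], ['w']), (['9', '9'], ['x']), (['9', '9', '9'], ['y']), (['9', '9', '9', '9'], ['z'])] := by rfl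

-- proof-side per-digit data, all read off B's mapping
def cycOf (d : Char) : List Char := (mappingB.get? d).getD []
def Mrun (d : Char) : Nat := max 1 (cycOf d).length
def cycAt (d : Char) (k : Nat) : List Char := ((cycOf d).drop (k - 1)).take 1

lemma Mrun_pos (d : Char) : 0 < Mrun d := by simp [Mrun]

-- the per-digit facts about A's generated dict, checked by evaluation
lemma keypad_get_run : ∀ d ∈ ['0','1','2','3','4','5','6','7','8','9'], ∀ k < Mrun d,
    keyPadToLetter.get? (List.replicate (k + 1) d) = some (cycAt d (k + 1)) := by
  rw [keypad_eval]; intro d hd; fin_cases hd <;> decide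

lemma keypad_no_overflow : ∀ d ∈ ['0','1','2','3','4','5','6','7','8','9'],
    keyPadToLetter.contains (List.replicate (Mrun d + 1) d) = false := by
  rw [keypad_eval]; intro d hd; fin_cases hd <;> decide

lemma keypad_contains_run : ∀ d ∈ ['0','1','2','3','4','5','6','7','8','9'], ∀ k < Mrun d,
    keyPadToLetter.contains (List.replicate (k + 1) d) = true := by
  rw [keypad_eval]; intro d hd; fin_cases hd <;> decide

lemma keypad_get_nil : keyPadToLetter.get? [] = some [] := by
  rw [keypad_eval]; decide

lemma take_one_drop (cyc : List Char) (i : ℕ) (h : i < cyc.length) :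
    (cyc.drop i).take 1 = [cyc[i]] := by
  rw [List.take_one, List.head?_drop, List.getElem?_eq_getElem h]; rfl

lemma getLast?_replicate_pos (k : ℕ) (d : Char) (h : 1 ≤ k) :
    (List.replicate k d).getLast? = some d := by
  cases k with
  | zero => omega
  | succ n => simp [List.getLast?_replicate]

-- A's handling of one run: consuming m further copies of d with a pending run d^k
lemma runA (d : Char) (hd : d ∈ ['0','1','2','3','4','5','6','7','8','9']) :
    ∀ (m : ℕ) (rest : List Char) (k : ℕ) (res : List Char), 1 ≤ k → k ≤ Mrun d →
    loopA (List.replicate m d ++ rest) (List.replicate k d) res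
      = loopA rest (List.replicate ((k + m - 1) % Mrun d + 1) d)
          (res ++ (List.replicate ((k + m - 1) / Mrun d) (cycAt d (Mrun d))).flatten) := by
  intro m
  induction m with
  | zero =>
    intro rest k res h1 h2
    have e2 : (k - 1) % Mrun d = k - 1 := Nat.mod_eq_of_lt (by have := Mrun_pos d; omega)
    have e3 : (k - 1) / Mrun d = 0 := Nat.div_eq_of_lt (by have := Mrun_pos d; omega)
    have e4 : k - 1 + 1 = k := by omega
    simp [e2, e3, e4]
  | succ m ih =>
    intro rest k res h1 h2
    have hrep : List.replicate (m + 1) d ++ rest = d :: (List.replicate m d ++ rest) := by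
      simp [List.replicate_succ]
    have hlast : (List.replicate k d).getLast? = some d := getLast?_replicate_pos k d h1
    have happ : List.replicate k d ++ [d] = List.replicate (k + 1) d := by
      rw [List.replicate_succ']
    rw [hrep]
    by_cases hk : k < Mrun d
    · have hc : keyPadToLetter.contains (List.replicate (k + 1) d) = true :=
        keypad_contains_run d hd k hk
      rw [loopA, if_neg (by
        rintro ⟨-, hor⟩
        rcases hor with h | h
        · exact h (by rw [hlast])
        · rw [happ, hc] at h; exact absurd h (by simp))]
      rw [happ]
      have := ih rest (k + 1) res (by omega) (by omega)
      rw [this]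
      have e : k + 1 + m - 1 = k + (m + 1) - 1 := by omega
      rw [e]
    · have hk' : k = Mrun d := by omega
      subst hk'
      have hc : keyPadToLetter.contains (List.replicate (Mrun d + 1) d) = false :=
        keypad_no_overflow d hd
      rw [loopA, if_pos ⟨by simpa using Mrun_pos d, Or.inr (by rw [happ]; exact hc)⟩]
      have hget : keyPadToLetter.get? (List.replicate (Mrun d) d) = some (cycAt d (Mrun d)) := by
        have := keypad_get_run d hd (Mrun d - 1) (by have := Mrun_pos d; omega)
        rwa [Nat.sub_add_cancel (Mrun_pos d)] at this
      rw [hget]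
      have := ih rest 1 (res ++ (some (cycAt d (Mrun d))).getD []) le_rfl (Mrun_pos d)
      rw [show [d] = List.replicate 1 d from rfl, this]
      have e1 : 1 + m - 1 = m := by omega
      have e2 : Mrun d + (m + 1) - 1 = Mrun d + m := by omega
      have e3 : (Mrun d + m) % Mrun d = m % Mrun d := Nat.add_mod_left _ _
      have e4 : (Mrun d + m) / Mrun d = m / Mrun d + 1 := by
        rw [Nat.add_comm, Nat.add_div_right _ (Mrun_pos d)]
      rw [e1, e2, e3, e4]
      congr 1
      simp [List.replicate_succ, List.append_assoc]

-- B's piece, written with the proof-side cycle data (definitional)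
lemma pieceB_def (d : Char) (n : Nat) : pieceB d n =
    if cycOf d = [] then [] else
      List.replicate (n / (cycOf d).length) ((cycOf d).getLastD 'a')
        ++ (if n % (cycOf d).length ≠ 0 then [(cycOf d).getD (n % (cycOf d).length - 1) 'a']
            else []) := rfl

-- what A emits for one whole run of m+1 presses equals B's piece for it
lemma piece_eq (d : Char) (m : ℕ) :
    (List.replicate (m / Mrun d) (cycAt d (Mrun d))).flatten ++ cycAt d (m % Mrun d + 1)
      = pieceB d (m + 1) := by
  by_cases hnil : cycOf d = []
  · rw [pieceB_def, if_pos hnil]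
    simp [cycAt, hnil]
  · have hL : 1 ≤ (cycOf d).length := by
      cases h : cycOf d with
      | nil => exact absurd h hnil
      | cons a t => simp
    set L := (cycOf d).length with hLdef
    have hM : Mrun d = L := by simp [Mrun, hLdef]; omega
    have hlt : L - 1 < L := by omega
    have hcycM : cycAt d L = [(cycOf d)[L - 1]] := by
      rw [cycAt]; exact take_one_drop _ _ hlt
    have hlastD : (cycOf d).getLastD 'a' = (cycOf d)[L - 1] := by
      rw [List.getLastD_eq_getLast?, List.getLast?_eq_getElem?, List.getElem?_eq_getElem hlt]
      rfl
    have hpiece : pieceB d (m + 1) =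
        List.replicate ((m + 1) / L) ((cycOf d)[L - 1])
          ++ (if (m + 1) % L ≠ 0 then [(cycOf d).getD ((m + 1) % L - 1) 'a'] else []) := by
      rw [pieceB_def, if_neg hnil, hlastD]
    by_cases h0 : (m + 1) % L = 0
    · obtain ⟨q, hq⟩ : ∃ q, m + 1 = q * L :=
        ⟨(m + 1) / L, by rw [Nat.div_mul_cancel (Nat.dvd_of_mod_eq_zero h0)]⟩
      obtain ⟨q', rfl⟩ : ∃ q', q = q' + 1 := by
        cases q with
        | zero => omega
        | succ n => exact ⟨n, rfl⟩
      have hm : m = (L - 1) + q' * L := by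
        have : (q' + 1) * L = q' * L + L := by ring
        rw [this] at hq
        set t := q' * L
        omega
      have hdiv : m / L = q' := by
        rw [hm, Nat.add_mul_div_right _ _ (by omega : 0 < L), Nat.div_eq_of_lt hlt]
        omega
      have hmod : m % L = L - 1 := by
        rw [hm, Nat.add_mul_mod_self_right, Nat.mod_eq_of_lt hlt]
      have hdiv1 : (m + 1) / L = q' + 1 := by
        rw [hq, Nat.mul_div_cancel _ (by omega : 0 < L)]
      have hcycr : cycAt d (m % L + 1) = [(cycOf d)[L - 1]] := by
        rw [cycAt, hmod]; simpa using take_one_drop _ _ hlt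
      rw [hpiece, hM, hdiv, hdiv1, hcycr, hcycM, if_neg (by omega),
        List.flatten_replicate_singleton, List.append_nil, ← List.replicate_succ']
    · set r := (m + 1) % L with hr
      have hr1 : 1 ≤ r := by omega
      have hrL : r < L := Nat.mod_lt _ (by omega)
      have hq := Nat.div_add_mod (m + 1) L
      set q := (m + 1) / L with hqdef
      have hm : m = (r - 1) + q * L := by
        rw [Nat.mul_comm] at hq
        set t := q * L
        omega
      have hdiv : m / L = q := by
        rw [hm, Nat.add_mul_div_right _ _ (by omega : 0 < L), Nat.div_eq_of_lt (by omega)]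
        omega
      have hmod : m % L = r - 1 := by
        rw [hm, Nat.add_mul_mod_self_right, Nat.mod_eq_of_lt (by omega)]
      have hcycr : cycAt d (m % L + 1) = [(cycOf d)[r - 1]'(by omega)] := by
        rw [cycAt, hmod]; simpa using take_one_drop _ _ (by omega)
      have hgetD : (cycOf d).getD (r - 1) 'a' = (cycOf d)[r - 1]'(by omega) :=
        List.getD_eq_getElem _ _ (by omega)
      rw [hpiece, hM, hdiv, hcycr, hcycM, if_pos (by omega), hgetD,
        List.flatten_replicate_singleton]

lemma head_dropWhile_ne (cs : List Char) (c e : Char) (t : List Char)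
    (h : cs.dropWhile (· == c) = e :: t) : ¬(e = c) := by
  have := List.head?_dropWhile_not (· == c) cs
  rw [h] at this; simpa using this

lemma main_loop : ∀ (l : List Char), (∀ c ∈ l, c ∈ ['0','1','2','3','4','5','6','7','8','9']) →
    ∀ res : List Char,
    loopA l [] res = res ++ ((runsB l).map (fun p => pieceB p.1 p.2)).flatten := by
  intro l
  induction l using runsB.induct with
  | case1 =>
    intro _ res
    simp [loopA, runsB, keypad_get_nil]
  | case2 c cs ih =>
    intro hdig res
    have hd : c ∈ ['0','1','2','3','4','5','6','7','8','9'] := hdig c (by simp)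
    set m := (cs.takeWhile (· == c)).length with hmdef
    have htake : cs.takeWhile (· == c) = List.replicate m c := by
      rw [hmdef]
      apply List.eq_replicate_of_mem
      intro b hb
      have := List.mem_takeWhile_imp hb
      simpa using this
    have hsplit : cs = List.replicate m c ++ cs.dropWhile (· == c) := by
      rw [← htake, List.takeWhile_append_dropWhile]
    have hstep1 : loopA (c :: cs) [] res = loopA cs [c] res := by
      rw [loopA, if_neg (by simp)]
      simp
    rw [hstep1]
    conv_lhs => rw [hsplit]
    rw [show [c] = List.replicate 1 c from rfl,
      runA c hd m (cs.dropWhile (· == c)) 1 res le_rfl (Mrun_pos c)]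
    have e1 : 1 + m - 1 = m := by omega
    rw [e1]
    have hmlt : m % Mrun c < Mrun c := Nat.mod_lt _ (Mrun_pos c)
    have hget : keyPadToLetter.get? (List.replicate (m % Mrun c + 1) c)
        = some (cycAt c (m % Mrun c + 1)) := keypad_get_run c hd _ hmlt
    have hruns : runsB (c :: cs) = (c, 1 + m) :: runsB (cs.dropWhile (· == c)) := by
      rw [runsB]
    cases hrest : cs.dropWhile (· == c) with
    | nil =>
      rw [loopA, hget]
      rw [hruns, hrest]
      simp only [runsB, List.map_cons, List.map_nil, List.flatten_cons, List.flatten_nil,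
        List.append_nil, Option.getD_some, List.append_assoc]
      rw [show 1 + m = m + 1 from by omega, ← piece_eq c m]
    | cons e rest2 =>
      have hne : ¬(e = c) := head_dropWhile_ne cs c e rest2 hrest
      have hstep2 : loopA (e :: rest2) (List.replicate (m % Mrun c + 1) c)
          (res ++ (List.replicate (m / Mrun c) (cycAt c (Mrun c))).flatten)
          = loopA rest2 [e]
            ((res ++ (List.replicate (m / Mrun c) (cycAt c (Mrun c))).flatten)
              ++ cycAt c (m % Mrun c + 1)) := by
        rw [loopA, if_pos ⟨by simp, Or.inl (by
          rw [getLast?_replicate_pos _ _ (by omega)]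
          intro hcon
          exact hne (Option.some.inj hcon).symm)⟩, hget]
        rfl
      have hstep3 : ∀ X : List Char, loopA (e :: rest2) [] X = loopA rest2 [e] X := by
        intro X
        rw [loopA, if_neg (by simp)]
        simp
      have hih := ih (by
        intro b hb
        exact hdig b (List.mem_cons_of_mem _ ((List.dropWhile_sublist _).mem hb)))
      rw [hrest] at hih
      rw [hstep2, ← hstep3, hih]
      rw [hruns, hrest]
      simp only [List.map_cons, List.flatten_cons]
      rw [show 1 + m = m + 1 from by omega, ← piece_eq c m]
      simp [List.append_assoc]

-- ===== VERDICT (by name: the statement is the Claim_ definition above) =====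
theorem keypad_string_spec : Claim_equal_keypad_string := by
  intro keys _ hpre
  have hdig : ∀ c ∈ keys.toList, c ∈ ['0','1','2','3','4','5','6','7','8','9'] := by
    intro c hc
    have := List.all_eq_true.mp hpre c hc
    simpa using this
  unfold Spec_keypad_string keypad_string keypad_string_alt
  rw [main_loop keys.toList hdig []]
  rfl
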